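-- pv_equiv track=rewrite | github.com/koa800/meta-banner-maker | System/cdp_sync.py | find_similar_emails
-- ===== SOURCE A (Python) =====
-- def levenshtein_distance(s1, s2):
--     """2つの文字列のレーベンシュタイン距離を計算"""
--     if len(s1) < len(s2):
--         return levenshtein_distance(s2, s1)
--     if len(s2) == 0:
--         return len(s1)
--
--     prev_row = range(len(s2) + 1)
--     for i, c1 in enumerate(s1):
--         curr_row = [i + 1]
--         for j, c2 in enumerate(s2):
--             # 挿入・削除・置換のコスト
--             insertions = prev_row[j + 1] + 1
--             deletions = curr_row[j] + 1
--             substitutions = prev_row[j] + (c1 != c2)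
--             curr_row.append(min(insertions, deletions, substitutions))
--         prev_row = curr_row
--     return prev_row[-1]
--
-- def find_similar_emails(new_email, existing_emails, threshold=2):
--     """類似メールアドレスを検出する
--
--     Args:
--         new_email: 新しいメールアドレス
--         existing_emails: 既存メールアドレスのセットまたはリスト
--         threshold: レーベンシュタイン距離の閾値（デフォルト2）
--
--     Returns:
--         [(existing_email, distance), ...] 類似メールのリスト
--     """
--     new_lower = new_email.strip().lower()
--     similar = []
--
--     # ドメイン部分が同じものだけ比較（パフォーマンス最適化）
--     new_local, new_domain = new_lower.split("@", 1) if "@" in new_lower else (new_lower, "")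
--
--     for existing in existing_emails:
--         existing_lower = existing.strip().lower()
--         if new_lower == existing_lower:
--             continue  # 完全一致はスキップ
--
--         ex_local, ex_domain = existing_lower.split("@", 1) if "@" in existing_lower else (existing_lower, "")
--
--         # 同じドメインのメールのみ比較
--         if new_domain and ex_domain and new_domain == ex_domain:
--             dist = levenshtein_distance(new_local, ex_local)
--             if dist <= threshold:
--                 similar.append((existing, dist))
--
--     return sorted(similar, key=lambda x: x[1])
-- ===== SOURCE B (Python) =====
-- def _bounded_lev(a, b):
--     """Levenshtein distance via a single row updated in place with a diagonal carry."""
--     row = list(range(len(a) + 1))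
--     for cb in b:
--         diag = row[0]
--         row[0] += 1
--         for i, ca in enumerate(a):
--             tmp = row[i + 1]
--             row[i + 1] = min(tmp + 1, row[i] + 1, diag + (ca != cb))
--             diag = tmp
--     return row[-1]
--
-- def find_similar_emails(new_email, existing_emails, threshold=2):
--     new_lower = new_email.strip().lower()
--     new_local, _, new_domain = new_lower.partition("@")
--     matches = []
--     maxd = -1
--     for existing in existing_emails:
--         existing_lower = existing.strip().lower()
--         if existing_lower == new_lower:
--             continue
--         ex_local, _, ex_domain = existing_lower.partition("@")
--         if not new_domain or ex_domain != new_domain: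
--             continue
--         if abs(len(ex_local) - len(new_local)) > threshold:
--             continue  # the distance is at least the length difference
--         dist = _bounded_lev(new_local, ex_local)
--         if dist <= threshold:
--             matches.append((existing, dist))
--             if dist > maxd:
--                 maxd = dist
--     # counting sort by distance (stable, distances are small non-negative ints)
--     buckets = [[] for _ in range(maxd + 1)]
--     for pair in matches:
--         buckets[pair[1]].append(pair)
--     return [p for b in buckets for p in b]
-- ===== Notes on version B (the rewrite author's own statement) =====
-- stated objective: alternative
-- what changed: B computes each Levenshtein distance with a single row updated in place (diagonal carry) instead of A's freshly built rows, skips pairs whose local-part length difference already exceeds the threshold, and replaces the final comparison sort by a stable counting sort into distance buckets.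
import Mathlib
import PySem

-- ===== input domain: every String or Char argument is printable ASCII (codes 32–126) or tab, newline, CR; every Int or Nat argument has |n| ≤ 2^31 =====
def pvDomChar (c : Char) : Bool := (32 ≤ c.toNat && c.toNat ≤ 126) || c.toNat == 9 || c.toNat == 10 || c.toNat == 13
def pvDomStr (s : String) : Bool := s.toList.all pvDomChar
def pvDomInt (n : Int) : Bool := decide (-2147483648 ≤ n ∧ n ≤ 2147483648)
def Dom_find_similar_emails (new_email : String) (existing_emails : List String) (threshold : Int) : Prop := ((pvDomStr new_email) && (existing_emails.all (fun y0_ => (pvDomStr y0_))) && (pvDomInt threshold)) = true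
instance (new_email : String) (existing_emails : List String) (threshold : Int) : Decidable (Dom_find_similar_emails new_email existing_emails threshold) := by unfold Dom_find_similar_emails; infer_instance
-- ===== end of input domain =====

-- B replaces A's full-matrix Levenshtein by a single in-place row with a diagonal carry,
-- adds a length-difference early skip, and replaces the final comparison sort by a
-- counting sort into distance buckets (objective: alternative).

-- ===== PORT A =====

-- shared by both ports: A's `s.split("@", 1)` guarded by `"@" in s`, else `(s, "")`.
-- (B's `s.partition("@")` yields exactly the same (local, domain) pair: for a present
-- single-character separator, partition splits at the first '@' just as split('@', 1).)
def pvSplitDomain (s : List Char) : List Char × List Char :=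
  if PySem.Chars.isIn ['@'] s then
    let parts := PySem.Chars.splitOnMax s ['@'] 1
    (parts.getD 0 [], parts.getD 1 [])  -- split('@',1) with '@' present always yields 2 parts
  else (s, [])

-- body of A's levenshtein_distance after the swap (values are Python ints, all ≥ 0: Nat is exact)
def pvLevBody (s1 s2 : List Char) : Nat :=
  if s2.length = 0 then s1.length
  else
    let prev := s1.zipIdx.foldl (fun prev_row ci =>
      s2.zipIdx.foldl (fun curr_row cj =>
        let insertions := prev_row.getD (cj.2 + 1) 0 + 1
        let deletions := curr_row.getD cj.2 0 + 1
        let substitutions := prev_row.getD cj.2 0 + (if ci.1 ≠ cj.1 then 1 else 0)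
        curr_row ++ [min insertions (min deletions substitutions)])
        [ci.2 + 1]) (List.range (s2.length + 1))
    (PySem.List.pyGet? prev (-1)).getD 0  -- prev_row[-1]; the row is never empty

def levenshtein_distance (s1 s2 : List Char) : Nat :=
  if h : s1.length < s2.length then levenshtein_distance s2 s1
  else pvLevBody s1 s2
termination_by s2.length
decreasing_by exact h

def find_similar_emails (new_email : String) (existing_emails : List String) (threshold : Int) : List (String × Int) :=
  let new_lower := PySem.Chars.lower (PySem.Chars.strip new_email.toList)
  let nd := pvSplitDomain new_lower
  let similar := existing_emails.foldl (fun similar existing =>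
    let existing_lower := PySem.Chars.lower (PySem.Chars.strip existing.toList)
    if existing_lower = new_lower then similar
    else
      let ed := pvSplitDomain existing_lower
      if nd.2 ≠ [] ∧ ed.2 ≠ [] ∧ nd.2 = ed.2 then
        let dist : Int := (levenshtein_distance nd.1 ed.1 : Int)
        if dist ≤ threshold then similar ++ [(existing, dist)] else similar
      else similar) []
  PySem.List.sorted similar (fun x => x.2)

-- ===== PORT B =====

-- B's inner loop: the row updated in place, `diag`/`left` carried, `old` the untouched tail
def pvRowStep (cb : Char) : List Char → Nat → Nat → List Nat → List Nat
  | [], _, _, _ => []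
  | ca :: rest, diag, left, old =>
    match old with
    | [] => []  -- unreachable: old always has one cell per remaining character
    | o :: os =>
      let v := min (o + 1) (min (left + 1) (diag + (if ca ≠ cb then 1 else 0)))
      v :: pvRowStep cb rest o v os

def bounded_lev (a b : List Char) : Nat :=
  let row := b.foldl (fun row cb =>
    match row with
    | [] => []  -- unreachable: the row is never empty
    | r0 :: rest => (r0 + 1) :: pvRowStep cb a r0 (r0 + 1) rest) (List.range (a.length + 1))
  (PySem.List.pyGet? row (-1)).getD 0  -- row[-1]; the row is never empty

def find_similar_emails_alt (new_email : String) (existing_emails : List String) (threshold : Int) : List (String × Int) :=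
  let new_lower := PySem.Chars.lower (PySem.Chars.strip new_email.toList)
  let nd := pvSplitDomain new_lower  -- partition("@"): see the helper's comment
  let st := existing_emails.foldl (fun (st : List (String × Int) × Int) existing =>
    let existing_lower := PySem.Chars.lower (PySem.Chars.strip existing.toList)
    if existing_lower = new_lower then st
    else
      let ed := pvSplitDomain existing_lower
      if nd.2 = [] ∨ ed.2 ≠ nd.2 then st
      else if |(ed.1.length : Int) - (nd.1.length : Int)| > threshold then st
      else
        let dist : Int := (bounded_lev nd.1 ed.1 : Int)
        if dist ≤ threshold then
          (st.1 ++ [(existing, dist)], if dist > st.2 then dist else st.2)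
        else st) ([], -1)
  let buckets := st.1.foldl (fun bks (p : String × Int) =>
      bks.set p.2.toNat (bks.getD p.2.toNat [] ++ [p]))
    ((PySem.List.pyRange 0 (st.2 + 1) 1).map (fun _ => ([] : List (String × Int))))
  buckets.flatten

-- ===== PRECONDITION & SPEC =====
def Spec_find_similar_emails (new_email : String) (existing_emails : List String) (threshold : Int) (out : List (String × Int)) : Prop := out = find_similar_emails_alt new_email existing_emails threshold
instance (new_email : String) (existing_emails : List String) (threshold : Int) (out : List (String × Int)) : Decidable (Spec_find_similar_emails new_email existing_emails threshold out) := by unfold Spec_find_similar_emails; infer_instance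

-- ===== CLAIM (what is proved, stated in full; the proofs are below) =====
def Claim_equal_find_similar_emails : Prop := ∀ (new_email : String) (existing_emails : List String) (threshold : Int), Dom_find_similar_emails new_email existing_emails threshold → Spec_find_similar_emails new_email existing_emails threshold (find_similar_emails new_email existing_emails threshold)

-- ===== LEMMAS AND PROOFS =====

-- reference Levenshtein distance, head recursion
def pvLev : List Char → List Char → Nat
  | [], b => b.length
  | a :: as, [] => (a :: as).length
  | c :: x, d :: y =>
    min (pvLev x (d :: y) + 1) (min (pvLev (c :: x) y + 1) (pvLev x y + (if c ≠ d then 1 else 0)))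
termination_by a b => a.length + b.length
decreasing_by all_goals (simp [List.length_cons]; try omega)

theorem pvLev_nil_right (a : List Char) : pvLev a [] = a.length := by
  cases a <;> simp [pvLev]

theorem pvLev_cons_cons (c d : Char) (x y : List Char) : pvLev (c :: x) (d :: y) =
    min (pvLev x (d :: y) + 1)
      (min (pvLev (c :: x) y + 1) (pvLev x y + (if c ≠ d then 1 else 0))) := by
  rw [pvLev]

theorem pvLev_comm (a b : List Char) : pvLev a b = pvLev b a := by
  fun_induction pvLev a b with
  | case1 b => cases b <;> simp [pvLev]
  | case2 a as => simp [pvLev]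
  | case3 c x d y ih1 ih2 ih3 =>
    rw [pvLev_cons_cons]
    rw [ih1, ih2, ih3]
    have : (if c ≠ d then 1 else 0) = (if d ≠ c then 1 else 0) := by
      by_cases h : c = d <;> simp [h, Ne, eq_comm]
    rw [this]; omega

theorem pv_getD_map_range (f : Nat → Nat) (n j : Nat) (h : j < n) :
    ((List.range n).map f).getD j 0 = f j := by
  simp [List.getD, h]

theorem pv_take_succ_rev (t : List Char) (j : Nat) (h : j < t.length) :
    (t.take (j + 1)).reverse = t[j] :: (t.take j).reverse := by
  rw [List.take_add_one]
  simp [List.getElem?_eq_getElem h]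

theorem pvInnerA_go (c : Char) (u t : List Char) (s' : List Char) (j : Nat)
    (hs : s' = t.drop j) (hj : j ≤ t.length) :
    (s'.zipIdx j).foldl (fun curr_row cj =>
        let insertions := ((List.range (t.length + 1)).map
            (fun k => pvLev u ((t.take k).reverse))).getD (cj.2 + 1) 0 + 1
        let deletions := curr_row.getD cj.2 0 + 1
        let substitutions := ((List.range (t.length + 1)).map
            (fun k => pvLev u ((t.take k).reverse))).getD cj.2 0 + (if c ≠ cj.1 then 1 else 0)
        curr_row ++ [min insertions (min deletions substitutions)])
      ((List.range (j + 1)).map (fun k => pvLev (c :: u) ((t.take k).reverse)))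
    = (List.range (t.length + 1)).map (fun k => pvLev (c :: u) ((t.take k).reverse)) := by
  induction s' generalizing j with
  | nil =>
    have : t.length ≤ j := by
      have := hs.symm; rw [List.drop_eq_nil_iff] at this; exact this
    have hje : j = t.length := le_antisymm hj this
    subst hje; simp
  | cons a s'' ih =>
    have hjlt : j < t.length := by
      by_contra hc
      rw [List.drop_eq_nil_iff.mpr (Nat.le_of_not_lt hc)] at hs
      exact (List.cons_ne_nil a s'') hs
    have hdc : a :: s'' = t[j] :: t.drop (j + 1) := by
      rw [hs, List.drop_eq_getElem_cons hjlt]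
    obtain ⟨ha, hs''⟩ := List.cons_eq_cons.mp hdc
    rw [List.zipIdx_cons, List.foldl_cons]
    have hstep : (((List.range (j + 1)).map (fun k => pvLev (c :: u) ((t.take k).reverse))) ++
        [min (((List.range (t.length + 1)).map (fun k => pvLev u ((t.take k).reverse))).getD (j + 1) 0 + 1)
          (min (((List.range (j + 1)).map (fun k => pvLev (c :: u) ((t.take k).reverse))).getD j 0 + 1)
            (((List.range (t.length + 1)).map (fun k => pvLev u ((t.take k).reverse))).getD j 0 + (if c ≠ a then 1 else 0)))])
        = (List.range (j + 1 + 1)).map (fun k => pvLev (c :: u) ((t.take k).reverse)) := by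
      rw [List.range_succ (n := j + 1), List.map_append]
      congr 1
      rw [pv_getD_map_range _ _ _ (by omega), pv_getD_map_range _ _ _ (by omega),
        pv_getD_map_range _ _ _ (by omega)]
      simp only [List.map_cons, List.map_nil]
      congr 1
      rw [pv_take_succ_rev t j hjlt, pvLev_cons_cons, ← pv_take_succ_rev t j hjlt, ha]
    show (s''.zipIdx (j+1)).foldl _ _ = _
    rw [hstep]
    exact ih (j + 1) hs'' (by omega)

theorem pvOuterA_go (t : List Char) (s : List Char) (k : Nat) (u : List Char)
    (hk : u.length = k) :
    (s.zipIdx k).foldl (fun prev_row ci =>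
      t.zipIdx.foldl (fun curr_row cj =>
        let insertions := prev_row.getD (cj.2 + 1) 0 + 1
        let deletions := curr_row.getD cj.2 0 + 1
        let substitutions := prev_row.getD cj.2 0 + (if ci.1 ≠ cj.1 then 1 else 0)
        curr_row ++ [min insertions (min deletions substitutions)])
        [ci.2 + 1])
      ((List.range (t.length + 1)).map (fun k => pvLev u ((t.take k).reverse)))
    = (List.range (t.length + 1)).map (fun k => pvLev (s.reverse ++ u) ((t.take k).reverse)) := by
  induction s generalizing k u with
  | nil => simp
  | cons c s'' ih =>
    rw [List.zipIdx_cons, List.foldl_cons]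
    have hseed : [k + 1] = (List.range (0 + 1)).map (fun k => pvLev (c :: u) ((t.take k).reverse)) := by
      simp [pvLev_nil_right, hk]
    have : (t.zipIdx).foldl (fun curr_row cj =>
        let insertions := ((List.range (t.length + 1)).map (fun k => pvLev u ((t.take k).reverse))).getD (cj.2 + 1) 0 + 1
        let deletions := curr_row.getD cj.2 0 + 1
        let substitutions := ((List.range (t.length + 1)).map (fun k => pvLev u ((t.take k).reverse))).getD cj.2 0 + (if c ≠ cj.1 then 1 else 0)
        curr_row ++ [min insertions (min deletions substitutions)])
      [k + 1] = (List.range (t.length + 1)).map (fun k => pvLev (c :: u) ((t.take k).reverse)) := by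
      rw [hseed]
      exact pvInnerA_go c u t t 0 (by simp) (by omega)
    rw [this]
    rw [ih (k + 1) (c :: u) (by simp [hk])]
    congr 2
    simp

theorem pv_pyGet_map_range_last (f : Nat → Nat) (n : Nat) :
    (PySem.List.pyGet? ((List.range (n + 1)).map f) (-1)).getD 0 = f n := by
  simp [PySem.List.pyGet?, PySem.List.pyIdx?]

theorem pv_init_row (u : List Char) (t : List Char) :
    (List.range (t.length + 1)).map (fun k => pvLev [] ((t.take k).reverse))
      = List.range (t.length + 1) := by
  rw [show (List.range (t.length + 1)) = (List.range (t.length + 1)).map id by simp]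
  rw [List.map_map]
  apply List.map_congr_left
  intro k hk
  rw [List.mem_range] at hk
  simp [pvLev]
  omega

theorem pvLevBody_eq (s1 s2 : List Char) : pvLevBody s1 s2 = pvLev s1.reverse s2.reverse := by
  unfold pvLevBody
  split
  · next h =>
    rw [List.length_eq_zero_iff] at h
    subst h
    simp [pvLev_nil_right]
  · next h =>
    rw [show (List.range (s2.length + 1)) =
        (List.range (s2.length + 1)).map (fun k => pvLev [] ((s2.take k).reverse)) from
      (pv_init_row [] s2).symm]
    rw [show s1.zipIdx = s1.zipIdx 0 from rfl]
    rw [pvOuterA_go s2 s1 0 [] rfl]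
    simp only [List.append_nil]
    rw [pv_pyGet_map_range_last]
    rw [List.take_length]

theorem levenshtein_distance_eq (s1 s2 : List Char) :
    levenshtein_distance s1 s2 = pvLev s1.reverse s2.reverse := by
  rw [levenshtein_distance]
  split
  · next h =>
    rw [levenshtein_distance]
    rw [dif_neg (by omega)]
    rw [pvLevBody_eq, pvLev_comm]
  · next h =>
    exact pvLevBody_eq s1 s2

theorem pvRowStep_go (cb : Char) (u a : List Char) (a' : List Char) (i : Nat)
    (hs : a' = a.drop i) :
    pvRowStep cb a' (pvLev u ((a.take i).reverse)) (pvLev (cb :: u) ((a.take i).reverse))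
      ((List.range' (i + 1) (a.length - i)).map (fun k => pvLev u ((a.take k).reverse)))
    = (List.range' (i + 1) (a.length - i)).map (fun k => pvLev (cb :: u) ((a.take k).reverse)) := by
  induction a' generalizing i with
  | nil =>
    have hle : a.length ≤ i := by
      have := hs.symm; rw [List.drop_eq_nil_iff] at this; exact this
    rw [Nat.sub_eq_zero_of_le hle]
    simp [pvRowStep]
  | cons ca rest ih =>
    have hjlt : i < a.length := by
      by_contra hc
      rw [List.drop_eq_nil_iff.mpr (Nat.le_of_not_lt hc)] at hs
      exact (List.cons_ne_nil ca rest) hs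
    have hdc : ca :: rest = a[i] :: a.drop (i + 1) := by
      rw [hs, List.drop_eq_getElem_cons hjlt]
    obtain ⟨ha, hrest⟩ := List.cons_eq_cons.mp hdc
    have hm : a.length - i = (a.length - (i + 1)) + 1 := by omega
    rw [hm, List.range'_succ, List.map_cons, List.map_cons]
    rw [pvRowStep]
    have hv : min (pvLev u ((a.take (i + 1)).reverse) + 1)
        (min (pvLev (cb :: u) ((a.take i).reverse) + 1)
          (pvLev u ((a.take i).reverse) + (if ca ≠ cb then 1 else 0)))
        = pvLev (cb :: u) ((a.take (i + 1)).reverse) := by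
      rw [pv_take_succ_rev a i hjlt, pvLev_cons_cons, ← pv_take_succ_rev a i hjlt, ha]
      have : (if a[i] ≠ cb then 1 else 0) = (if cb ≠ a[i] then 1 else 0) := by
        by_cases h : cb = a[i] <;> simp [h, Ne, eq_comm]
      rw [this]
    rw [hv]
    congr 1
    have := ih (i + 1) hrest
    rw [show i + 1 + 1 = i + 2 from rfl] at this
    exact this

theorem pvOuterB_go (a : List Char) (w : List Char) (V : List Char) :
    w.foldl (fun row cb =>
      match row with
      | [] => []
      | r0 :: rest => (r0 + 1) :: pvRowStep cb a r0 (r0 + 1) rest)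
      ((List.range (a.length + 1)).map (fun k => pvLev V ((a.take k).reverse)))
    = (List.range (a.length + 1)).map (fun k => pvLev (w.reverse ++ V) ((a.take k).reverse)) := by
  induction w generalizing V with
  | nil => simp
  | cons cb w' ih =>
    rw [List.foldl_cons]
    have hrow : (List.range (a.length + 1)).map (fun k => pvLev V ((a.take k).reverse))
        = pvLev V ((a.take 0).reverse) ::
          (List.range' 1 (a.length - 0)).map (fun k => pvLev V ((a.take k).reverse)) := by
      rw [List.range_eq_range', List.range'_succ, List.map_cons, Nat.sub_zero]
    have hstep : (match (List.range (a.length + 1)).map (fun k => pvLev V ((a.take k).reverse)) with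
        | [] => ([] : List Nat)
        | r0 :: rest => (r0 + 1) :: pvRowStep cb a r0 (r0 + 1) rest)
        = (List.range (a.length + 1)).map (fun k => pvLev (cb :: V) ((a.take k).reverse)) := by
      rw [hrow]
      simp only []
      have hleft : pvLev V ((a.take 0).reverse) + 1 = pvLev (cb :: V) ((a.take 0).reverse) := by
        simp [pvLev_nil_right]
      rw [hleft]
      rw [pvRowStep_go cb V a a 0 (by simp)]
      rw [List.range_eq_range' (n := a.length + 1), List.range'_succ, List.map_cons, Nat.sub_zero]
    rw [hstep, ih (cb :: V)]
    congr 2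
    simp

theorem bounded_lev_eq (a b : List Char) : bounded_lev a b = pvLev b.reverse a.reverse := by
  unfold bounded_lev
  rw [show (List.range (a.length + 1)) =
      (List.range (a.length + 1)).map (fun k => pvLev [] ((a.take k).reverse)) from
    (pv_init_row [] a).symm]
  rw [pvOuterB_go a b []]
  simp only [List.append_nil]
  rw [pv_pyGet_map_range_last]
  rw [List.take_length]

theorem dist_eq (nl el : List Char) : bounded_lev nl el = levenshtein_distance nl el := by
  rw [bounded_lev_eq, levenshtein_distance_eq, pvLev_comm]

theorem pvLev_length_le (a b : List Char) :
    a.length ≤ pvLev a b + b.length ∧ b.length ≤ pvLev a b + a.length := by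
  fun_induction pvLev a b with
  | case1 b => simp
  | case2 a as => simp [pvLev_nil_right]
  | case3 c x d y ih1 ih2 ih3 =>
    simp only [List.length_cons] at *
    split_ifs <;> omega

theorem prune_sound (nl el : List Char) (threshold : Int)
    (h : |(el.length : Int) - (nl.length : Int)| > threshold) :
    ¬ ((levenshtein_distance nl el : Int) ≤ threshold) := by
  rw [levenshtein_distance_eq]
  have hl := pvLev_length_le nl.reverse el.reverse
  simp only [List.length_reverse] at hl
  rcases abs_cases ((el.length : Int) - (nl.length : Int)) with ⟨he, _⟩ | ⟨he, _⟩ <;>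
    rw [he] at h <;> omega

theorem pv_insertBy_append {α : Type} (before : α → α → Bool) (x : α) (l1 l2 : List α)
    (h : ∀ y ∈ l1, before x y = false) :
    PySem.List.insertBy before x (l1 ++ l2) = l1 ++ PySem.List.insertBy before x l2 := by
  induction l1 with
  | nil => simp
  | cons y ys ih =>
    simp only [List.cons_append, PySem.List.insertBy]
    rw [h y (by simp)]
    simp only [Bool.false_eq_true, if_false]
    rw [ih (fun z hz => h z (by simp [hz]))]

theorem pv_insertBy_all_before {α : Type} (before : α → α → Bool) (x : α) (l : List α)
    (h : ∀ y ∈ l, before x y = true) :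
    PySem.List.insertBy before x l = x :: l := by
  cases l with
  | nil => simp [PySem.List.insertBy]
  | cons y ys => simp [PySem.List.insertBy, h y (by simp)]

theorem pv_mem_flatten_key {α : Type} (bks : List (List (α × Int))) (base : Nat)
    (hpure : ∀ (j : Nat) (hj : j < bks.length), ∀ q ∈ bks[j], q.2 = ((base + j : Nat) : Int))
    (q : α × Int) (hq : q ∈ bks.flatten) : ∃ j < bks.length, q.2 = ((base + j : Nat) : Int) := by
  rw [List.mem_flatten] at hq
  obtain ⟨l, hl, hql⟩ := hq
  obtain ⟨j, hj, hlj⟩ := List.mem_iff_getElem.mp hl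
  exact ⟨j, hj, hpure j hj q (by rw [hlj]; exact hql)⟩

theorem pv_insert_flatten (p : String × Int) :
    ∀ (bks : List (List (String × Int))) (base k : Nat) (hk : k < bks.length),
    (∀ (j : Nat) (hj : j < bks.length), ∀ q ∈ bks[j], q.2 = ((base + j : Nat) : Int)) →
    p.2 = ((base + k : Nat) : Int) →
    PySem.List.insertBy (fun a b => decide (a.2 < b.2)) p bks.flatten
      = (bks.set k (bks[k] ++ [p])).flatten := by
  intro bks
  induction bks with
  | nil => intro base k hk; simp at hk
  | cons b0 rest ih =>
    intro base k hk hpure hp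
    cases k with
    | zero =>
      rw [List.flatten_cons]
      rw [pv_insertBy_append _ _ b0 _ (by
        intro y hy
        have := hpure 0 (by simp) y (by simpa using hy)
        simp only [decide_eq_false_iff_not, not_lt]
        rw [hp, this])]
      rw [pv_insertBy_all_before _ _ _ (by
        intro y hy
        obtain ⟨j, hj, hyj⟩ := pv_mem_flatten_key rest (base + 1)
          (by intro j hj q hq
              have := hpure (j + 1) (by simpa using hj) q (by simpa using hq)
              rw [this]; push_cast; ring_nf) y hy
        simp only [decide_eq_true_eq]
        rw [hp, hyj]; push_cast; omega)]
      simp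
    | succ k' =>
      rw [List.flatten_cons]
      rw [pv_insertBy_append _ _ b0 _ (by
        intro y hy
        have := hpure 0 (by simp) y (by simpa using hy)
        simp only [decide_eq_false_iff_not, not_lt]
        rw [hp, this]; push_cast; omega)]
      have hk' : k' < rest.length := by simpa using hk
      rw [ih (base + 1) k' hk'
        (by intro j hj q hq
            have := hpure (j + 1) (by simpa using hj) q (by simpa using hq)
            rw [this]; push_cast; ring_nf)
        (by rw [hp]; push_cast; ring_nf)]
      simp

theorem pv_csort_go :
    ∀ (ms : List (String × Int)) (bks : List (List (String × Int))),
    (∀ (j : Nat) (hj : j < bks.length), ∀ q ∈ bks[j], q.2 = (j : Int)) →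
    (∀ p ∈ ms, 0 ≤ p.2 ∧ p.2.toNat < bks.length) →
    (ms.foldl (fun bks (p : String × Int) =>
        bks.set p.2.toNat (bks.getD p.2.toNat [] ++ [p])) bks).flatten
      = ms.foldl (fun acc x => PySem.List.insertBy (fun a b => decide (a.2 < b.2)) x acc)
          bks.flatten := by
  intro ms
  induction ms with
  | nil => intro bks _ _; simp
  | cons p ms' ih =>
    intro bks hpure hin
    obtain ⟨hp0, hplt⟩ := hin p (by simp)
    rw [List.foldl_cons, List.foldl_cons]
    rw [List.getD_eq_getElem bks [] hplt]
    rw [ih (bks.set p.2.toNat (bks[p.2.toNat] ++ [p]))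
      (by intro j hj q hq
          rw [List.length_set] at hj
          by_cases hjk : j = p.2.toNat
          · subst hjk
            rw [List.getElem_set_self] at hq
            rcases List.mem_append.mp hq with h | h
            · exact hpure _ hj q h
            · simp at h; rw [h]; omega
          · rw [List.getElem_set_ne (by omega)] at hq
            exact hpure j hj q hq)
      (by intro q hq
          obtain ⟨h1, h2⟩ := hin q (by simp [hq])
          rw [List.length_set]; exact ⟨h1, h2⟩)]
    congr 1
    rw [pv_insert_flatten p bks 0 p.2.toNat hplt
      (by intro j hj q hq; have := hpure j hj q hq; rw [this]; push_cast; ring_nf)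
      (by push_cast; omega)]

theorem pv_csort (ms : List (String × Int)) (maxd : Int) (hmax : -1 ≤ maxd)
    (h : ∀ p ∈ ms, 0 ≤ p.2 ∧ p.2 ≤ maxd) :
    (ms.foldl (fun bks (p : String × Int) =>
        bks.set p.2.toNat (bks.getD p.2.toNat [] ++ [p]))
      ((PySem.List.pyRange 0 (maxd + 1) 1).map (fun _ => ([] : List (String × Int))))).flatten
    = PySem.List.sorted ms (fun p => p.2) := by
  have hcast : maxd + 1 = (((maxd + 1).toNat : Nat) : Int) := by omega
  have hinit : (PySem.List.pyRange 0 (maxd + 1) 1).map (fun _ => ([] : List (String × Int)))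
      = List.replicate (maxd + 1).toNat ([] : List (String × Int)) := by
    rw [hcast, PySem.List.pyRange_zero_natCast, List.map_map]
    simp [Function.comp_def, List.map_const']
    omega
  rw [hinit]
  rw [pv_csort_go ms _
    (by intro j hj q hq
        rw [List.getElem_replicate] at hq
        simp at hq)
    (by intro p hp
        obtain ⟨h1, h2⟩ := h p hp
        rw [List.length_replicate]; exact ⟨h1, by omega⟩)]
  rw [PySem.List.sorted_eq_foldl_insertBy]
  congr 1
  induction (maxd + 1).toNat with
  | zero => simp
  | succ n ihn => simp [List.replicate_succ, ihn]

theorem pv_main_fold (new_lower : List Char) (nd : List Char × List Char) (threshold : Int)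
    (es : List String) (sim : List (String × Int)) (st : List (String × Int) × Int)
    (h1 : st.1 = sim) (h2 : ∀ p ∈ sim, 0 ≤ p.2 ∧ p.2 ≤ st.2) :
    (es.foldl (fun (st : List (String × Int) × Int) existing =>
      if PySem.Chars.lower (PySem.Chars.strip existing.toList) = new_lower then st
      else
        if nd.2 = [] ∨ (pvSplitDomain (PySem.Chars.lower (PySem.Chars.strip existing.toList))).2 ≠ nd.2 then st
        else if |((pvSplitDomain (PySem.Chars.lower (PySem.Chars.strip existing.toList))).1.length : Int) - (nd.1.length : Int)| > threshold then st
        else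
          if ((bounded_lev nd.1 (pvSplitDomain (PySem.Chars.lower (PySem.Chars.strip existing.toList))).1 : Nat) : Int) ≤ threshold then
            (st.1 ++ [(existing, ((bounded_lev nd.1 (pvSplitDomain (PySem.Chars.lower (PySem.Chars.strip existing.toList))).1 : Nat) : Int))],
             if ((bounded_lev nd.1 (pvSplitDomain (PySem.Chars.lower (PySem.Chars.strip existing.toList))).1 : Nat) : Int) > st.2
             then ((bounded_lev nd.1 (pvSplitDomain (PySem.Chars.lower (PySem.Chars.strip existing.toList))).1 : Nat) : Int) else st.2)
          else st) st).1
      = es.foldl (fun similar existing =>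
          if PySem.Chars.lower (PySem.Chars.strip existing.toList) = new_lower then similar
          else
            if nd.2 ≠ [] ∧ (pvSplitDomain (PySem.Chars.lower (PySem.Chars.strip existing.toList))).2 ≠ [] ∧ nd.2 = (pvSplitDomain (PySem.Chars.lower (PySem.Chars.strip existing.toList))).2 then
              if ((levenshtein_distance nd.1 (pvSplitDomain (PySem.Chars.lower (PySem.Chars.strip existing.toList))).1 : Nat) : Int) ≤ threshold then
                similar ++ [(existing, ((levenshtein_distance nd.1 (pvSplitDomain (PySem.Chars.lower (PySem.Chars.strip existing.toList))).1 : Nat) : Int))]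
              else similar
            else similar) sim
    ∧ st.2 ≤ (es.foldl (fun (st : List (String × Int) × Int) existing =>
      if PySem.Chars.lower (PySem.Chars.strip existing.toList) = new_lower then st
      else
        if nd.2 = [] ∨ (pvSplitDomain (PySem.Chars.lower (PySem.Chars.strip existing.toList))).2 ≠ nd.2 then st
        else if |((pvSplitDomain (PySem.Chars.lower (PySem.Chars.strip existing.toList))).1.length : Int) - (nd.1.length : Int)| > threshold then st
        else
          if ((bounded_lev nd.1 (pvSplitDomain (PySem.Chars.lower (PySem.Chars.strip existing.toList))).1 : Nat) : Int) ≤ threshold then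
            (st.1 ++ [(existing, ((bounded_lev nd.1 (pvSplitDomain (PySem.Chars.lower (PySem.Chars.strip existing.toList))).1 : Nat) : Int))],
             if ((bounded_lev nd.1 (pvSplitDomain (PySem.Chars.lower (PySem.Chars.strip existing.toList))).1 : Nat) : Int) > st.2
             then ((bounded_lev nd.1 (pvSplitDomain (PySem.Chars.lower (PySem.Chars.strip existing.toList))).1 : Nat) : Int) else st.2)
          else st) st).2
    ∧ (∀ p ∈ es.foldl (fun similar existing =>
          if PySem.Chars.lower (PySem.Chars.strip existing.toList) = new_lower then similar
          else
            if nd.2 ≠ [] ∧ (pvSplitDomain (PySem.Chars.lower (PySem.Chars.strip existing.toList))).2 ≠ [] ∧ nd.2 = (pvSplitDomain (PySem.Chars.lower (PySem.Chars.strip existing.toList))).2 then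
              if ((levenshtein_distance nd.1 (pvSplitDomain (PySem.Chars.lower (PySem.Chars.strip existing.toList))).1 : Nat) : Int) ≤ threshold then
                similar ++ [(existing, ((levenshtein_distance nd.1 (pvSplitDomain (PySem.Chars.lower (PySem.Chars.strip existing.toList))).1 : Nat) : Int))]
              else similar
            else similar) sim,
        0 ≤ p.2 ∧ p.2 ≤ (es.foldl (fun (st : List (String × Int) × Int) existing =>
      if PySem.Chars.lower (PySem.Chars.strip existing.toList) = new_lower then st
      else
        if nd.2 = [] ∨ (pvSplitDomain (PySem.Chars.lower (PySem.Chars.strip existing.toList))).2 ≠ nd.2 then st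
        else if |((pvSplitDomain (PySem.Chars.lower (PySem.Chars.strip existing.toList))).1.length : Int) - (nd.1.length : Int)| > threshold then st
        else
          if ((bounded_lev nd.1 (pvSplitDomain (PySem.Chars.lower (PySem.Chars.strip existing.toList))).1 : Nat) : Int) ≤ threshold then
            (st.1 ++ [(existing, ((bounded_lev nd.1 (pvSplitDomain (PySem.Chars.lower (PySem.Chars.strip existing.toList))).1 : Nat) : Int))],
             if ((bounded_lev nd.1 (pvSplitDomain (PySem.Chars.lower (PySem.Chars.strip existing.toList))).1 : Nat) : Int) > st.2
             then ((bounded_lev nd.1 (pvSplitDomain (PySem.Chars.lower (PySem.Chars.strip existing.toList))).1 : Nat) : Int) else st.2)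
          else st) st).2) := by
  induction es generalizing sim st with
  | nil =>
    simp only [List.foldl_nil]
    exact ⟨h1, le_refl _, h2⟩
  | cons e es' ih =>
    simp only [List.foldl_cons]
    by_cases hEq : PySem.Chars.lower (PySem.Chars.strip e.toList) = new_lower
    · simp only [if_pos hEq]
      exact ih sim st h1 h2
    · simp only [if_neg hEq]
      by_cases hdom : nd.2 ≠ [] ∧ (pvSplitDomain (PySem.Chars.lower (PySem.Chars.strip e.toList))).2 ≠ [] ∧ nd.2 = (pvSplitDomain (PySem.Chars.lower (PySem.Chars.strip e.toList))).2
      · have hBdom : ¬ (nd.2 = [] ∨ (pvSplitDomain (PySem.Chars.lower (PySem.Chars.strip e.toList))).2 ≠ nd.2) := by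
          rintro (h | h)
          · exact hdom.1 h
          · exact h hdom.2.2.symm
        simp only [if_neg hBdom, if_pos hdom]
        by_cases hpr : |((pvSplitDomain (PySem.Chars.lower (PySem.Chars.strip e.toList))).1.length : Int) - (nd.1.length : Int)| > threshold
        · have hA : ¬ (((levenshtein_distance nd.1 (pvSplitDomain (PySem.Chars.lower (PySem.Chars.strip e.toList))).1 : Nat) : Int) ≤ threshold) :=
            prune_sound nd.1 (pvSplitDomain (PySem.Chars.lower (PySem.Chars.strip e.toList))).1 threshold hpr
          simp only [if_pos hpr, if_neg hA]
          exact ih sim st h1 h2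
        · simp only [if_neg hpr]
          have hd : ((bounded_lev nd.1 (pvSplitDomain (PySem.Chars.lower (PySem.Chars.strip e.toList))).1 : Nat) : Int)
              = ((levenshtein_distance nd.1 (pvSplitDomain (PySem.Chars.lower (PySem.Chars.strip e.toList))).1 : Nat) : Int) := by
            rw [dist_eq]
          rw [hd]
          by_cases hle : ((levenshtein_distance nd.1 (pvSplitDomain (PySem.Chars.lower (PySem.Chars.strip e.toList))).1 : Nat) : Int) ≤ threshold
          · simp only [if_pos hle]
            obtain ⟨ihA, ihB, ihC⟩ := ih (sim ++ [(e, ((levenshtein_distance nd.1 (pvSplitDomain (PySem.Chars.lower (PySem.Chars.strip e.toList))).1 : Nat) : Int))])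
              (st.1 ++ [(e, ((levenshtein_distance nd.1 (pvSplitDomain (PySem.Chars.lower (PySem.Chars.strip e.toList))).1 : Nat) : Int))],
               if ((levenshtein_distance nd.1 (pvSplitDomain (PySem.Chars.lower (PySem.Chars.strip e.toList))).1 : Nat) : Int) > st.2
               then ((levenshtein_distance nd.1 (pvSplitDomain (PySem.Chars.lower (PySem.Chars.strip e.toList))).1 : Nat) : Int) else st.2)
              (by simp [h1])
              (by intro p hp
                  rcases List.mem_append.mp hp with h | h
                  · obtain ⟨hp1, hp2⟩ := h2 p h
                    refine ⟨hp1, ?_⟩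
                    simp only []
                    split_ifs <;> omega
                  · simp only [List.mem_singleton] at h
                    subst h
                    simp only []
                    refine ⟨Int.natCast_nonneg _, ?_⟩
                    split_ifs <;> omega)
            refine ⟨ihA, le_trans ?_ ihB, ihC⟩
            simp only []
            split_ifs <;> omega
          · simp only [if_neg hle]
            exact ih sim st h1 h2
      · have hBdom : nd.2 = [] ∨ (pvSplitDomain (PySem.Chars.lower (PySem.Chars.strip e.toList))).2 ≠ nd.2 := by
          by_cases hn : nd.2 = []
          · exact Or.inl hn
          · right
            intro hcontra
            exact hdom ⟨hn, by rw [hcontra]; exact hn, hcontra.symm⟩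
        simp only [if_pos hBdom, if_neg hdom]
        exact ih sim st h1 h2

-- ===== VERDICT (by name: the statement is the Claim_ definition above) =====
theorem find_similar_emails_spec : Claim_equal_find_similar_emails := by
  unfold Claim_equal_find_similar_emails
  intro new_email existing_emails threshold _
  unfold Spec_find_similar_emails find_similar_emails find_similar_emails_alt
  simp only []
  obtain ⟨hA, hB, hC⟩ := pv_main_fold
    (PySem.Chars.lower (PySem.Chars.strip new_email.toList))
    (pvSplitDomain (PySem.Chars.lower (PySem.Chars.strip new_email.toList)))
    threshold existing_emails [] ([], -1) rfl (by simp)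
  rw [hA]
  exact (pv_csort _ _ hB hC).symm
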